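-- pv_equiv track=rewrite | github.com/GabrieleMaurina/BabelRTS | babelrts/components/test_selector.py | _dfs_changed
-- ===== SOURCE A (Python) =====
-- from collections import deque
--
-- def _dfs_changed(test_files, changed_files, dependencies):
--     files = deque(changed_files)
--     visited = set()
--     selected_tests = set()
--     while files:
--         file = files.pop()
--         if file not in visited:
--             visited.add(file)
--             if file in test_files:
--                 selected_tests.add(file)
--             if file in dependencies:
--                 files.extend(dependencies[file])
--     return selected_tests
-- ===== SOURCE B (Python) =====
-- def _dfs_changed(test_files, changed_files, dependencies):
--     # Recursive DFS with a shared visited set, instead of A's explicit-stack loop.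
--     # Iterating in reversed order keeps the visitation order of the stack version
--     # (irrelevant to the returned set, which is the same either way).
--     visited = set()
--     selected_tests = set()
--
--     def visit(file):
--         if file in visited:
--             return
--         visited.add(file)
--         if file in test_files:
--             selected_tests.add(file)
--         if file in dependencies:
--             for dep in reversed(dependencies[file]):
--                 visit(dep)
--
--     for file in reversed(changed_files):
--         visit(file)
--     return selected_tests
-- ===== Notes on version B (the rewrite author's own statement) =====
-- stated objective: alternative
-- what changed: The iterative explicit-stack/deque DFS loop is re-decomposed as a recursive inner visit() helper sharing the visited and selected sets, driven by a loop over the changed files; the pending-files deque disappears entirely.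
import Mathlib
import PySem

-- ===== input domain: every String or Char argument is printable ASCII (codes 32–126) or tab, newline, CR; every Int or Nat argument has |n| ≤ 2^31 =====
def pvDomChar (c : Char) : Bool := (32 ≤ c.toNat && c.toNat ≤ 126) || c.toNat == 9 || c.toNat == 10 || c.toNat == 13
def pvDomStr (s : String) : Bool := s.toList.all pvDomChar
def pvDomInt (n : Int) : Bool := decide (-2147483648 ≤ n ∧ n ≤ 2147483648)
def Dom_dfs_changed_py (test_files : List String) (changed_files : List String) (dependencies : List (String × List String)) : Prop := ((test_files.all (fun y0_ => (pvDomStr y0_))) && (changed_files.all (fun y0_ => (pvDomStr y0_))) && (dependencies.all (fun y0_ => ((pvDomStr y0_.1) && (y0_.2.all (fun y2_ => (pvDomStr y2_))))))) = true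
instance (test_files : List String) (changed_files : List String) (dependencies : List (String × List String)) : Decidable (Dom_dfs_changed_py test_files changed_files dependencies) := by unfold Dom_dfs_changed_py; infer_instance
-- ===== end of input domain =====

-- B re-decomposes A's explicit-stack DFS loop as a recursive visit helper sharing the
-- visited/selected sets (objective: alternative decomposition, same cost).

-- ===== PORT A =====
-- while loop over the deque: pop from the right, extend on the right.  The Nat
-- argument is a fuel guard making the loop total; (L+1)^2 with
-- L = len(changed_files) + sum of dependency-list lengths is proved sufficient below.
def dfs_changed_loop (test_files : List String) (dependencies : List (String × List String)) :
    Nat → List String → PySem.Set String → PySem.Set String → PySem.Set String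
  | 0, _, _, selected_tests => selected_tests
  | fuel + 1, files, visited, selected_tests =>
    match files.getLast? with
    | none => selected_tests                                         -- while files: exits
    | some file =>                                                   -- file = files.pop()
      let files' := files.dropLast
      if PySem.Set.contains visited file then
        dfs_changed_loop test_files dependencies fuel files' visited selected_tests
      else
        let visited' := PySem.Set.add visited file
        let selected' := if test_files.contains file
                         then PySem.Set.add selected_tests file else selected_tests
        match (PySem.Dict.mk dependencies).get? file with            -- if file in dependencies
        | some deps => dfs_changed_loop test_files dependencies fuel (files' ++ deps) visited' selected'
        | none => dfs_changed_loop test_files dependencies fuel files' visited' selected'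

def dfs_changed_py (test_files : List String) (changed_files : List String) (dependencies : List (String × List String)) : List String :=
  let L := changed_files.length + (dependencies.map (fun p => p.2.length)).sum
  dfs_changed_loop test_files dependencies ((L + 1) * (L + 1)) changed_files PySem.Set.empty PySem.Set.empty

-- ===== PORT B =====
-- recursive visit(file) sharing (visited, selected); fuel bounds the recursion depth
-- (same bound, proved sufficient below).
mutual
def dfs_changed_visit (test_files : List String) (dependencies : List (String × List String))
    (fuel : Nat) (file : String) (st : PySem.Set String × PySem.Set String) :
    PySem.Set String × PySem.Set String :=
  match fuel with
  | 0 => st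
  | fuel + 1 =>
    if PySem.Set.contains st.1 file then st
    else
      let visited' := PySem.Set.add st.1 file
      let selected' := if test_files.contains file
                       then PySem.Set.add st.2 file else st.2
      match (PySem.Dict.mk dependencies).get? file with              -- if file in dependencies
      | some deps => dfs_changed_visitList test_files dependencies fuel deps.reverse (visited', selected')
      | none => (visited', selected')
termination_by (fuel, 0)

def dfs_changed_visitList (test_files : List String) (dependencies : List (String × List String))
    (fuel : Nat) (l : List String) (st : PySem.Set String × PySem.Set String) :
    PySem.Set String × PySem.Set String :=
  match l with
  | [] => st
  | file :: rest => dfs_changed_visitList test_files dependencies fuel rest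
      (dfs_changed_visit test_files dependencies fuel file st)
termination_by (fuel, l.length)
end

def dfs_changed_py_alt (test_files : List String) (changed_files : List String) (dependencies : List (String × List String)) : List String :=
  let L := changed_files.length + (dependencies.map (fun p => p.2.length)).sum
  (dfs_changed_visitList test_files dependencies ((L + 1) * (L + 1)) changed_files.reverse
    (PySem.Set.empty, PySem.Set.empty)).2

-- ===== PRECONDITION & SPEC =====
def Spec_dfs_changed_py (test_files : List String) (changed_files : List String) (dependencies : List (String × List String)) (out : List String) : Prop := out = dfs_changed_py_alt test_files changed_files dependencies
instance (test_files : List String) (changed_files : List String) (dependencies : List (String × List String)) (out : List String) : Decidable (Spec_dfs_changed_py test_files changed_files dependencies out) := by unfold Spec_dfs_changed_py; infer_instance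

-- ===== CLAIM (what is proved, stated in full; the proofs are below) =====
def Claim_equal_dfs_changed_py : Prop := ∀ (test_files : List String) (changed_files : List String) (dependencies : List (String × List String)), Dom_dfs_changed_py test_files changed_files dependencies → Spec_dfs_changed_py test_files changed_files dependencies (dfs_changed_py test_files changed_files dependencies)

-- ===== LEMMAS AND PROOFS =====

-- children of a node, as pushed by A / recursed over (reversed) by B
def pvChl (dependencies : List (String × List String)) (x : String) : List String :=
  ((PySem.Dict.mk dependencies).get? x).getD []

-- universe of nodes that can ever enter the stack / be visited
def pvU (changed_files : List String) (dependencies : List (String × List String)) : List String :=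
  changed_files ++ dependencies.flatMap (fun p => p.2)

-- weight of the unvisited part of the universe: bounds both A's remaining pushes
-- and B's remaining recursion depth
def pvW (changed_files : List String) (dependencies : List (String × List String))
    (v : PySem.Set String) : Nat :=
  (((pvU changed_files dependencies).dedup.filter (fun y => decide (y ∉ v))).map
    (fun y => (pvChl dependencies y).length + 1)).sum

theorem pvChl_sub_U (cf : List String) (dp : List (String × List String)) (x y : String)
    (h : y ∈ pvChl dp x) : y ∈ pvU cf dp := by
  unfold pvChl at h
  unfold pvU
  cases hg : (PySem.Dict.mk dp).get? x with
  | none => rw [hg] at h; simp at h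
  | some deps =>
    rw [hg] at h
    simp only [Option.getD_some] at h
    have hm : (x, deps) ∈ (PySem.Dict.mk dp).items := PySem.Dict.mem_items_of_get?_eq_some _ hg
    have : (x, deps) ∈ dp := hm
    refine List.mem_append_right _ ?_
    exact List.mem_flatMap.mpr ⟨(x, deps), this, h⟩

theorem pv_sum_filter_split (f : String → Nat) (x : String) (v : PySem.Set String)
    (hv : x ∉ v) :
    ∀ (l : List String), l.Nodup → x ∈ l →
    ((l.filter (fun y => decide (y ∉ v))).map f).sum
      = f x + ((l.filter (fun y => decide (y ∉ PySem.Set.add v x))).map f).sum := by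
  intro l
  induction l with
  | nil => intro _ h; simp at h
  | cons a l ih =>
    intro hnd hx
    have hnd' := hnd.of_cons
    have ha : a ∉ l := (List.nodup_cons.mp hnd).1
    rcases List.mem_cons.mp hx with rfl | hx'
    · have hcong : l.filter (fun y => decide (y ∉ PySem.Set.add v x))
          = l.filter (fun y => decide (y ∉ v)) := by
        apply List.filter_congr
        intro y hy
        have hne : y ≠ x := fun h => ha (h ▸ hy)
        simp [PySem.Set.mem_add, hne]
      rw [List.filter_cons, List.filter_cons, hcong]
      have h1 : decide (x ∉ v) = true := by simpa using hv
      have h2 : decide (x ∉ PySem.Set.add v x) = false := by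
        simp [PySem.Set.mem_add]
      rw [h1, h2]
      simp
    · have hne : a ≠ x := fun h => ha (h ▸ hx')
      have hsame : decide (a ∉ PySem.Set.add v x) = decide (a ∉ v) := by
        simp [PySem.Set.mem_add, hne]
      rw [List.filter_cons, List.filter_cons, hsame]
      by_cases hca : a ∈ v
      · simp only [hca, not_true_eq_false, decide_false, Bool.false_eq_true, if_false]
        exact ih hnd' hx'
      · simp only [hca, not_false_eq_true, decide_true, if_true, List.map_cons, List.sum_cons]
        rw [ih hnd' hx']
        omega

-- W splits off exactly the weight of a newly visited universe node
theorem pvW_split (cf : List String) (dp : List (String × List String))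
    (v : PySem.Set String) (x : String) (hx : x ∈ pvU cf dp) (hv : x ∉ v) :
    pvW cf dp v = (pvChl dp x).length + 1 + pvW cf dp (PySem.Set.add v x) := by
  unfold pvW
  have := pv_sum_filter_split (fun y => (pvChl dp y).length + 1) x v hv
    (pvU cf dp).dedup (List.nodup_dedup _) (List.mem_dedup.mpr hx)
  omega

theorem pv_sum_filter_mono (f : String → Nat) (p q : String → Bool)
    (h : ∀ y, p y = true → q y = true) :
    ∀ (l : List String), ((l.filter p).map f).sum ≤ ((l.filter q).map f).sum := by
  intro l
  exact List.Sublist.sum_le_sum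
    (List.Sublist.map f (List.monotone_filter_right l h)) (by simp)

theorem pvW_add_le (cf : List String) (dp : List (String × List String))
    (v : PySem.Set String) (x : String) :
    pvW cf dp (PySem.Set.add v x) ≤ pvW cf dp v := by
  unfold pvW
  apply pv_sum_filter_mono
  intro y hy
  simp only [decide_eq_true_eq] at hy ⊢
  intro hmem
  exact hy ((PySem.Set.mem_add _ _ _).mpr (Or.inl hmem))

-- the visited set only grows, so W never increases under visit / visitList
theorem pvW_visit_le (tf cf : List String) (dp : List (String × List String)) :
    ∀ fuel : Nat,
      (∀ x st, pvW cf dp (dfs_changed_visit tf dp fuel x st).1 ≤ pvW cf dp st.1) ∧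
      (∀ l st, pvW cf dp (dfs_changed_visitList tf dp fuel l st).1 ≤ pvW cf dp st.1) := by
  intro fuel
  induction fuel with
  | zero =>
    constructor
    · intro x st; rw [dfs_changed_visit]
    · intro l
      induction l with
      | nil => intro st; rw [dfs_changed_visitList]
      | cons a l ihl =>
        intro st
        rw [dfs_changed_visitList]
        calc pvW cf dp (dfs_changed_visitList tf dp 0 l (dfs_changed_visit tf dp 0 a st)).1
            ≤ pvW cf dp (dfs_changed_visit tf dp 0 a st).1 := ihl _
          _ ≤ pvW cf dp st.1 := by rw [dfs_changed_visit]
  | succ fuel ih =>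
    have hvisit : ∀ x st, pvW cf dp (dfs_changed_visit tf dp (fuel + 1) x st).1 ≤ pvW cf dp st.1 := by
      intro x st
      rw [dfs_changed_visit]
      cases hc : PySem.Set.contains st.1 x with
      | true => simp
      | false =>
        simp only [Bool.false_eq_true, if_false]
        cases hg : (PySem.Dict.mk dp).get? x with
        | none => simpa using pvW_add_le cf dp st.1 x
        | some deps =>
          simp only
          calc pvW cf dp (dfs_changed_visitList tf dp fuel deps.reverse
                (PySem.Set.add st.1 x, if tf.contains x then PySem.Set.add st.2 x else st.2)).1
              ≤ pvW cf dp (PySem.Set.add st.1 x) := ih.2 _ _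
            _ ≤ pvW cf dp st.1 := pvW_add_le cf dp st.1 x
    refine ⟨hvisit, ?_⟩
    intro l
    induction l with
    | nil => intro st; rw [dfs_changed_visitList]
    | cons a l ihl =>
      intro st
      rw [dfs_changed_visitList]
      calc pvW cf dp (dfs_changed_visitList tf dp (fuel+1) l (dfs_changed_visit tf dp (fuel+1) a st)).1
          ≤ pvW cf dp (dfs_changed_visit tf dp (fuel+1) a st).1 := ihl _
        _ ≤ pvW cf dp st.1 := hvisit a st

-- above the weight of the unvisited universe, the fuel does not matter
theorem pv_fuel_congr (tf cf : List String) (dp : List (String × List String)) :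
    ∀ k : Nat, ∀ v : PySem.Set String, pvW cf dp v ≤ k →
      ∀ (l : List String) (s : PySem.Set String) (f g : Nat),
        (∀ y ∈ l, y ∈ pvU cf dp) → pvW cf dp v < f → pvW cf dp v < g →
        dfs_changed_visitList tf dp f l (v, s) = dfs_changed_visitList tf dp g l (v, s) := by
  intro k
  induction k using Nat.strong_induction_on with
  | _ k IH =>
    intro v hvk l
    induction l with
    | nil =>
      intro s f g _ _ _
      rw [dfs_changed_visitList, dfs_changed_visitList]
    | cons x r ihr =>
      intro s f g hsub hf hg
      obtain ⟨f', rfl⟩ : ∃ f', f = f' + 1 := ⟨f - 1, by omega⟩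
      obtain ⟨g', rfl⟩ : ∃ g', g = g' + 1 := ⟨g - 1, by omega⟩
      rw [dfs_changed_visitList, dfs_changed_visitList]
      rw [dfs_changed_visit, dfs_changed_visit]
      cases hc : PySem.Set.contains v x with
      | true =>
        exact ihr s (f' + 1) (g' + 1) (fun y hy => hsub y (List.mem_cons_of_mem _ hy)) hf hg
      | false =>
        simp only [Bool.false_eq_true, if_false]
        have hxU : x ∈ pvU cf dp := hsub x List.mem_cons_self
        have hxv : x ∉ v := fun h => by
          rw [(PySem.Set.contains_iff _ _).mpr h] at hc; cases hc
        have hsplit := pvW_split cf dp v x hxU hxv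
        set v' := PySem.Set.add v x with hv'
        set s' := if tf.contains x then PySem.Set.add s x else s with hs'
        cases hg2 : (PySem.Dict.mk dp).get? x with
        | none =>
          simp only
          have hchl : (pvChl dp x).length = 0 := by unfold pvChl; rw [hg2]; rfl
          exact IH (pvW cf dp v') (by omega) v' (le_refl _) r s' (f' + 1) (g' + 1)
            (fun y hy => hsub y (List.mem_cons_of_mem _ hy)) (by omega) (by omega)
        | some deps =>
          simp only
          have hdeps : deps = pvChl dp x := by unfold pvChl; rw [hg2]; rfl
          have hWv' : pvW cf dp v' < pvW cf dp v := by omega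
          have hsub' : ∀ y ∈ deps.reverse, y ∈ pvU cf dp := by
            intro y hy
            exact pvChl_sub_U cf dp x y (hdeps ▸ List.mem_reverse.mp hy)
          have hdlen : deps.length = (pvChl dp x).length := by rw [hdeps]
          have hinner : dfs_changed_visitList tf dp f' deps.reverse (v', s')
              = dfs_changed_visitList tf dp g' deps.reverse (v', s') :=
            IH (pvW cf dp v') (by omega) v' (le_refl _) deps.reverse s' f' g' hsub'
              (by omega) (by omega)
          rw [hinner]
          set st'' := dfs_changed_visitList tf dp g' deps.reverse (v', s') with hst''
          have hWst : pvW cf dp st''.1 ≤ pvW cf dp v' := by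
            rw [hst'']; exact (pvW_visit_le tf cf dp g').2 _ _
          have : dfs_changed_visitList tf dp (f' + 1) r (st''.1, st''.2)
              = dfs_changed_visitList tf dp (g' + 1) r (st''.1, st''.2) :=
            IH (pvW cf dp st''.1) (by omega) st''.1 (le_refl _) r st''.2 (f' + 1) (g' + 1)
              (fun y hy => hsub y (List.mem_cons_of_mem _ hy)) (by omega) (by omega)
          simpa using this

theorem pv_visitList_nil (tf : List String) (dp : List (String × List String))
    (f : Nat) (st : PySem.Set String × PySem.Set String) :
    dfs_changed_visitList tf dp f [] st = st := by
  rw [dfs_changed_visitList]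

theorem pv_visitList_append (tf : List String) (dp : List (String × List String))
    (f : Nat) : ∀ (l1 l2 : List String) (st : PySem.Set String × PySem.Set String),
    dfs_changed_visitList tf dp f (l1 ++ l2) st
      = dfs_changed_visitList tf dp f l2 (dfs_changed_visitList tf dp f l1 st) := by
  intro l1
  induction l1 with
  | nil => intro l2 st; rw [List.nil_append, pv_visitList_nil]
  | cons a l1 ih =>
    intro l2 st
    rw [List.cons_append, dfs_changed_visitList, dfs_changed_visitList]
    exact ih l2 _

-- MAIN: A's stack loop, seen from the reversed stack, is B's recursive visit list
theorem pv_main (tf cf : List String) (dp : List (String × List String)) :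
    ∀ fa : Nat, ∀ (r : List String) (v s : PySem.Set String) (fb : Nat),
      (∀ y ∈ r, y ∈ pvU cf dp) →
      r.length + pvW cf dp v < fa → pvW cf dp v < fb →
      dfs_changed_loop tf dp fa r.reverse v s
        = (dfs_changed_visitList tf dp fb r (v, s)).2 := by
  intro fa
  induction fa with
  | zero => intro r v s fb _ h _; omega
  | succ fa ih =>
    intro r v s fb hsub hfa hfb
    cases r with
    | nil =>
      rw [List.reverse_nil, dfs_changed_loop, pv_visitList_nil]
      rfl
    | cons x r' =>
      have hrev : (x :: r').reverse = r'.reverse ++ [x] := by simp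
      obtain ⟨fb', rfl⟩ : ∃ fb', fb = fb' + 1 := ⟨fb - 1, by omega⟩
      have hsub' : ∀ y ∈ r', y ∈ pvU cf dp := fun y hy => hsub y (List.mem_cons_of_mem _ hy)
      have hxU : x ∈ pvU cf dp := hsub x List.mem_cons_self
      rw [hrev, dfs_changed_loop, dfs_changed_visitList, dfs_changed_visit]
      simp only [List.getLast?_concat, List.dropLast_concat]
      by_cases hc : PySem.Set.contains v x = true
      · rw [if_pos hc, if_pos hc]
        exact ih r' v s (fb' + 1) hsub' (by simp only [List.length_cons] at hfa; omega) hfb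
      · rw [if_neg hc, if_neg hc]
        have hxv : x ∉ v := fun h => hc ((PySem.Set.contains_iff _ _).mpr h)
        have hsplit := pvW_split cf dp v x hxU hxv
        cases hg : (PySem.Dict.mk dp).get? x with
        | none =>
          simp only
          have hchl : (pvChl dp x).length = 0 := by unfold pvChl; rw [hg]; rfl
          exact ih r' (PySem.Set.add v x)
            (if tf.contains x then PySem.Set.add s x else s) (fb' + 1) hsub'
            (by simp only [List.length_cons] at hfa; omega) (by omega)
        | some deps =>
          simp only
          have hdeps : deps = pvChl dp x := by unfold pvChl; rw [hg]; rfl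
          have hsubd : ∀ y ∈ deps.reverse ++ r', y ∈ pvU cf dp := by
            intro y hy
            rcases List.mem_append.mp hy with hy | hy
            · exact pvChl_sub_U cf dp x y (hdeps ▸ List.mem_reverse.mp hy)
            · exact hsub' y hy
          have hre : r'.reverse ++ deps = (deps.reverse ++ r').reverse := by simp
          have hWv' : pvW cf dp (PySem.Set.add v x) + (deps.length + 1) = pvW cf dp v := by
            have : deps.length = (pvChl dp x).length := by rw [hdeps]
            omega
          rw [hre, ih (deps.reverse ++ r') (PySem.Set.add v x)
            (if tf.contains x then PySem.Set.add s x else s) (fb' + 1) hsubd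
            (by simp only [List.length_append, List.length_reverse, List.length_cons] at hfa ⊢; omega)
            (by omega)]
          rw [pv_visitList_append]
          have hfc : dfs_changed_visitList tf dp fb' deps.reverse
              (PySem.Set.add v x, if tf.contains x then PySem.Set.add s x else s)
              = dfs_changed_visitList tf dp (fb' + 1) deps.reverse
              (PySem.Set.add v x, if tf.contains x then PySem.Set.add s x else s) := by
            apply pv_fuel_congr tf cf dp (pvW cf dp (PySem.Set.add v x)) _ (le_refl _)
            · intro y hy
              exact pvChl_sub_U cf dp x y (hdeps ▸ List.mem_reverse.mp hy)
            · omega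
            · omega
          rw [hfc]

theorem pvW_empty_le (cf : List String) (dp : List (String × List String)) :
    pvW cf dp PySem.Set.empty
      ≤ (pvU cf dp).length * ((dp.map (fun p => p.2.length)).sum + 1) := by
  unfold pvW
  have h1 : ((pvU cf dp).dedup.filter (fun y => decide (y ∉ PySem.Set.empty)))
      = (pvU cf dp).dedup := by
    apply List.filter_eq_self.mpr
    intro y _
    simp [PySem.Set.empty]
  rw [h1]
  have hbound : ∀ z ∈ (pvU cf dp).dedup.map (fun y => (pvChl dp y).length + 1),
      z ≤ (dp.map (fun p => p.2.length)).sum + 1 := by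
    intro z hz
    rcases List.mem_map.mp hz with ⟨y, _, rfl⟩
    have : (pvChl dp y).length ≤ (dp.map (fun p => p.2.length)).sum := by
      unfold pvChl
      cases hg : (PySem.Dict.mk dp).get? y with
      | none => simp
      | some deps =>
        simp only [Option.getD_some]
        have hm : (y, deps) ∈ dp := PySem.Dict.mem_items_of_get?_eq_some _ hg
        have : deps.length ∈ dp.map (fun p => p.2.length) :=
          List.mem_map.mpr ⟨(y, deps), hm, rfl⟩
        exact List.le_sum_of_mem this
    omega
  calc ((pvU cf dp).dedup.map (fun y => (pvChl dp y).length + 1)).sum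
      ≤ ((pvU cf dp).dedup.map (fun y => (pvChl dp y).length + 1)).length
          * ((dp.map (fun p => p.2.length)).sum + 1) := by
        have := List.sum_le_card_nsmul _ _ hbound
        simpa using this
    _ ≤ (pvU cf dp).length * ((dp.map (fun p => p.2.length)).sum + 1) := by
        apply Nat.mul_le_mul_right
        rw [List.length_map]
        exact List.Sublist.length_le (List.dedup_sublist _)

-- ===== VERDICT (by name: the statement is the Claim_ definition above) =====
theorem dfs_changed_py_spec : Claim_equal_dfs_changed_py := by
  intro tf cf dp _
  unfold Spec_dfs_changed_py dfs_changed_py dfs_changed_py_alt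
  simp only
  set L := cf.length + (dp.map (fun p => p.2.length)).sum with hL
  have hUlen : (pvU cf dp).length = L := by
    unfold pvU
    simp [hL, List.length_flatMap]
  have hW : pvW cf dp PySem.Set.empty ≤ L * (L + 1) := by
    have h1 := pvW_empty_le cf dp
    have h2 : (dp.map (fun p => p.2.length)).sum + 1 ≤ L + 1 := by omega
    calc pvW cf dp PySem.Set.empty
        ≤ (pvU cf dp).length * ((dp.map (fun p => p.2.length)).sum + 1) := h1
      _ ≤ L * (L + 1) := by rw [hUlen]; exact Nat.mul_le_mul_left _ h2
  have hmain := pv_main tf cf dp ((L + 1) * (L + 1)) cf.reverse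
    PySem.Set.empty PySem.Set.empty ((L + 1) * (L + 1))
    (fun y hy => by
      unfold pvU
      exact List.mem_append_left _ (List.mem_reverse.mp hy))
    (by
      rw [List.length_reverse]
      have : cf.length ≤ L := by omega
      nlinarith)
    (by nlinarith)
  rw [List.reverse_reverse] at hmain
  exact hmain
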